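-- pv_equiv track=rewrite | github.com/NCKU-CCS/energy-trading-platform | pt/blockchain/helper.py | get_matched_point
-- ===== SOURCE A (Python) =====
-- def accumulate_bids(buy_bids, sell_bids):
--     """
--     Description:
--         Accumulate buys and sells volume value for demand-supply list
--     Arguments:
--         buy_bids - buyers' bidsubmits. Index:(volume, price)
--         sell_bids - sellers' bidsubmits. Index:(volume, price)
--     """
--
--     for i in range(1, len(sell_bids)):
--         sell_bids[i][0] += sell_bids[i - 1][0]
--
--     for i in range(1, len(buy_bids)):
--         buy_bids[i][0] += buy_bids[i - 1][0]
--
--     return buy_bids, sell_bids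
--
-- def get_base_volumes(buy_bids, sell_bids):
--     """
--     Description:
--         Get the base volumes for all the buys and sells.
--     Arguments:
--         buy_bids - buyers' bidsubmits. Index:(volume, price)
--         sell_bids - sellers' bidsubmits. Index:(volume, price)
--     """
--
--     set_buy = {buy[0] for buy in buy_bids}
--     set_sell = {sell[0] for sell in sell_bids}
--     base_volumes = list(set_buy.union(set_sell))
--     base_volumes.sort()
--     return base_volumes
--
-- def get_matched_point(buy_bids, sell_bids):
--     """
--     Description:
--         Make buys and sells have same volume axis (base on `get_base_volumes`)
--     Arguments:
--         buy_bids - buyers' bidsubmits. Index:(volume, price)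
--         sell_bids - sellers' bidsubmits. Index:(volume, price)
--     """
--
--     base_volumes = get_base_volumes(*accumulate_bids(buy_bids, sell_bids))
--     buy_bids.insert(0, [0, 0])
--     sell_bids.insert(0, [0, 0])
--
--     matched_price = 0
--     matched_volume = 0
--     matched = False
--     for volume in base_volumes:
--         # price buy
--         for i in range(1, len(buy_bids)):
--             if buy_bids[i - 1][0] < volume <= buy_bids[i][0]:
--                 price_buy = buy_bids[i][1]
--                 break
--         else:
--             price_buy = buy_bids[-1][1]
--
--         # volume sell
--         for i in range(1, len(sell_bids)):
--             if sell_bids[i - 1][0] < volume <= sell_bids[i][0]: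
--                 price_sell = sell_bids[i - 1][1]
--                 break
--         else:
--             price_sell = sell_bids[-1][1]
--
--         if price_buy <= price_sell:
--             matched = True
--             break
--
--         matched_price = price_sell
--         matched_volume = volume
--
--     if matched:
--         return matched_volume, matched_price
--     return None
-- ===== SOURCE B (Python) =====
-- def _cumulate(bids):
--     """Cumulative-volume curve [(cum_volume, row), ...] with a (0, [0, 0]) origin."""
--     curve = [(0, [0, 0])]
--     total = 0
--     for row in bids:
--         total += row[0]
--         curve.append((total, row))
--     return curve
--
--
-- def _bisect_gt(vols, x):
--     """First index j with vols[j] > x (vols sorted ascending)."""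
--     lo, hi = 0, len(vols)
--     while lo < hi:
--         mid = (lo + hi) // 2
--         if vols[mid] <= x:
--             lo = mid + 1
--         else:
--             hi = mid
--     return lo
--
--
-- def _price_table(curve, vols, pick_prev):
--     """vol -> price of the FIRST curve segment (lo, hi] containing vol (the
--     segment's upper point's price, or the lower point's when pick_prev).
--     Built segment-by-segment into a dict; the sorted volume axis is narrowed
--     to each segment's range by binary search."""
--     table = {}
--     for i in range(1, len(curve)):
--         lo, hi = curve[i - 1][0], curve[i][0]
--         if lo >= hi:
--             continue
--         price = (curve[i - 1] if pick_prev else curve[i])[1][1]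
--         for v in vols[_bisect_gt(vols, lo):_bisect_gt(vols, hi)]:
--             if v not in table:
--                 table[v] = price
--     return table
--
--
-- def get_matched_point(buy_bids, sell_bids):
--     buy_curve = _cumulate(buy_bids)
--     sell_curve = _cumulate(sell_bids)
--     vols = sorted({c for c, _ in buy_curve[1:]} | {c for c, _ in sell_curve[1:]})
--     buy_table = _price_table(buy_curve, vols, False)
--     sell_table = _price_table(sell_curve, vols, True)
--     buy_default = buy_curve[-1][1][1]
--     sell_default = sell_curve[-1][1][1]
--     matched_price = 0
--     matched_volume = 0
--     for v in vols:
--         price_buy = buy_table.get(v, buy_default)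
--         price_sell = sell_table.get(v, sell_default)
--         if price_buy <= price_sell:
--             return matched_volume, matched_price
--         matched_price = price_sell
--         matched_volume = v
--     return None
-- ===== Notes on version B (the rewrite author's own statement) =====
-- stated objective: alternative
-- what changed: Instead of rescanning both bid lists from the start for every base volume (A's nested index loops with break/else), B builds the two cumulative price curves functionally, builds one volume->price dict per side in a single walk over the curve's segments (each segment's (lo, hi] volume range located by binary search in the sorted volume axis), and finishes with one scan over the volume axis doing dict lookups; …
-- outside the precondition, e.g. on get_matched_point([], [[1]]): A returns (0, 0), B raises IndexError; on get_matched_point([[5, 2]], [[5, 3], [1]]): A returns (5, 0), B raises IndexError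
import Mathlib
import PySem

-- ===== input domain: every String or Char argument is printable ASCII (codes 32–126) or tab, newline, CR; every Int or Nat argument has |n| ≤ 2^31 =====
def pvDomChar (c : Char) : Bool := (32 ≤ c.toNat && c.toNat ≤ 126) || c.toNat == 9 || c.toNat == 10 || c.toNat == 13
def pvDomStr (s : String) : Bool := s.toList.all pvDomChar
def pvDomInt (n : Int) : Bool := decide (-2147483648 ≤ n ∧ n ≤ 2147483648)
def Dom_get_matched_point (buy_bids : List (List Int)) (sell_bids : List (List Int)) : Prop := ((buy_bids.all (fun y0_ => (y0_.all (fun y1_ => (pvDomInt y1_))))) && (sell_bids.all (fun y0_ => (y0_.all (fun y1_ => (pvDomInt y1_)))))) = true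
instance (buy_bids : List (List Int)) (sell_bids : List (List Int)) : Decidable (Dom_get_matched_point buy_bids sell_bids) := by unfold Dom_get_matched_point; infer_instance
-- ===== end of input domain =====

-- B replaces A's per-volume rescans by per-side volume→price dicts built once over the curve's
-- segments (binary search into the sorted volume axis) plus a single lookup scan (objective:
-- alternative). Return-value equivalence only: the Python A mutates its list arguments in place.

-- ===== PORT A =====
-- accumulate_bids: 'for i in range(1, len(l)): l[i][0] += l[i-1][0]' — structural scan carrying
-- the previous cumulated head; row 0 gets 'head + 0', i.e. stays as written.
def aAcc (prev : Int) : List (List Int) → List (List Int)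
  | [] => []
  | r :: rs =>
      let v := PySem.List.pyGetD r 0 0 + prev
      PySem.List.pySetD r 0 v :: aAcc v rs

def accumulate_bids (buy_bids sell_bids : List (List Int)) : List (List Int) × List (List Int) :=
  (aAcc 0 buy_bids, aAcc 0 sell_bids)

def get_base_volumes (buy_bids sell_bids : List (List Int)) : List Int :=
  let set_buy : PySem.Set Int := PySem.Set.ofList (buy_bids.map (fun r => PySem.List.pyGetD r 0 0))
  let set_sell : PySem.Set Int := PySem.Set.ofList (sell_bids.map (fun r => PySem.List.pyGetD r 0 0))
  PySem.List.sorted (PySem.Set.union set_buy set_sell) (fun x => x) false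

-- 'for i in range(1, len(b)): if b[i-1][0] < v <= b[i][0]: price = b[i][1]; break / else: b[-1][1]'
-- as the scan over consecutive (previous, current) rows; falling off the end is the for-else.
def aPBgo (v dflt : Int) (prev : List Int) : List (List Int) → Int
  | [] => dflt
  | cur :: rest =>
      if PySem.List.pyGetD prev 0 0 < v ∧ v ≤ PySem.List.pyGetD cur 0 0 then
        PySem.List.pyGetD cur 1 0
      else aPBgo v dflt cur rest

def aPSgo (v dflt : Int) (prev : List Int) : List (List Int) → Int
  | [] => dflt
  | cur :: rest =>
      if PySem.List.pyGetD prev 0 0 < v ∧ v ≤ PySem.List.pyGetD cur 0 0 then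
        PySem.List.pyGetD prev 1 0
      else aPSgo v dflt cur rest

def aPriceBuy (b : List (List Int)) (v : Int) : Int :=
  let dflt := PySem.List.pyGetD (PySem.List.pyGetD b (-1) []) 1 0
  match b with
  | [] => dflt
  | r :: rs => aPBgo v dflt r rs

def aPriceSell (s : List (List Int)) (v : Int) : Int :=
  let dflt := PySem.List.pyGetD (PySem.List.pyGetD s (-1) []) 1 0
  match s with
  | [] => dflt
  | r :: rs => aPSgo v dflt r rs

def aMain (bb sb : List (List Int)) : List Int → Int → Int → Option (Int × Int)
  | [], _mp, _mv => none
  | v :: vs, mp, mv =>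
      let price_buy := aPriceBuy bb v
      let price_sell := aPriceSell sb v
      if price_buy ≤ price_sell then some (mv, mp)
      else aMain bb sb vs price_sell v

def get_matched_point (buy_bids : List (List Int)) (sell_bids : List (List Int)) : Option (Int × Int) :=
  let acc := accumulate_bids buy_bids sell_bids
  let base_volumes := get_base_volumes acc.1 acc.2
  let bb := ([0, 0] : List Int) :: acc.1
  let sb := ([0, 0] : List Int) :: acc.2
  aMain bb sb base_volumes 0 0

-- ===== PORT B =====
def bCum (total : Int) : List (List Int) → List (Int × List Int)
  | [] => []
  | r :: rs =>
      let t := total + PySem.List.pyGetD r 0 0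
      (t, r) :: bCum t rs

def bCurve (bids : List (List Int)) : List (Int × List Int) :=
  (0, ([0, 0] : List Int)) :: bCum 0 bids

def bBisect (vols : List Int) (x : Int) (lo hi : Nat) : Nat :=
  if lo < hi then
    let mid := (lo + hi) / 2
    if PySem.List.pyGetD vols (mid : Int) 0 ≤ x then bBisect vols x (mid + 1) hi
    else bBisect vols x lo mid
  else lo
termination_by hi - lo
decreasing_by all_goals omega

def bBisectGt (vols : List Int) (x : Int) : Nat := bBisect vols x 0 vols.length

def bSeg (vols : List Int) (pickPrev : Bool) (table : PySem.Dict Int Int)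
    (prev : Int × List Int) : List (Int × List Int) → PySem.Dict Int Int
  | [] => table
  | cur :: rest =>
      let lo := prev.1
      let hi := cur.1
      if lo ≥ hi then bSeg vols pickPrev table cur rest
      else
        let price := PySem.List.pyGetD (if pickPrev then prev else cur).2 1 0
        let seg := PySem.List.slice vols (some ((bBisectGt vols lo : Nat) : Int))
                     (some ((bBisectGt vols hi : Nat) : Int))
        let table' := seg.foldl (fun d v => if d.contains v then d else d.insert v price) table
        bSeg vols pickPrev table' cur rest

def bPriceTable (curve : List (Int × List Int)) (vols : List Int) (pickPrev : Bool) :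
    PySem.Dict Int Int :=
  match curve with
  | [] => PySem.Dict.empty
  | c :: rest => bSeg vols pickPrev PySem.Dict.empty c rest

def bMain (bt st : PySem.Dict Int Int) (bd sd : Int) : List Int → Int → Int → Option (Int × Int)
  | [], _mp, _mv => none
  | v :: vs, mp, mv =>
      let price_buy := bt.getD v bd
      let price_sell := st.getD v sd
      if price_buy ≤ price_sell then some (mv, mp)
      else bMain bt st bd sd vs price_sell v

def get_matched_point_alt (buy_bids : List (List Int)) (sell_bids : List (List Int)) : Option (Int × Int) :=
  let buy_curve := bCurve buy_bids
  let sell_curve := bCurve sell_bids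
  let vols := PySem.List.sorted
      (PySem.Set.union
        (PySem.Set.ofList (((PySem.List.slice buy_curve (some 1) none)).map (·.1)))
        (PySem.Set.ofList (((PySem.List.slice sell_curve (some 1) none)).map (·.1))))
      (fun x => x) false
  let buy_table := bPriceTable buy_curve vols false
  let sell_table := bPriceTable sell_curve vols true
  let buy_default := PySem.List.pyGetD (PySem.List.pyGetD buy_curve (-1) (0, [])).2 1 0
  let sell_default := PySem.List.pyGetD (PySem.List.pyGetD sell_curve (-1) (0, [])).2 1 0
  bMain buy_table sell_table buy_default sell_default vols 0 0

-- ===== PRECONDITION & SPEC =====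
-- Pre_ excludes bids containing a malformed row: an empty row (both Pythons raise IndexError),
-- or a row missing its price field ([1] instead of [volume, price]) in a position whose curve
-- segment can be consulted — there B raises IndexError while A raises on most and returns a
-- value only when its early exit happens to skip the missing price.  A row missing its price is
-- admitted when its guarding volume is ≤ 0 (its segment is empty) and it is not the last row:
-- neither program ever reads that price.
def Pre_get_matched_point (buy_bids : List (List Int)) (sell_bids : List (List Int)) : Prop :=
  (∀ r ∈ buy_bids, r ≠ []) ∧ (∀ r ∈ sell_bids, r ≠ []) ∧
  (∀ i, i < buy_bids.length →
      2 ≤ (buy_bids.getD i []).length ∨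
      (i + 1 < buy_bids.length ∧ (buy_bids.getD i []).getD 0 0 ≤ 0)) ∧
  (∀ i, i < sell_bids.length →
      2 ≤ (sell_bids.getD i []).length ∨
      (i + 1 < sell_bids.length ∧ (sell_bids.getD (i + 1) []).getD 0 0 ≤ 0))

instance (buy_bids : List (List Int)) (sell_bids : List (List Int)) :
    Decidable (Pre_get_matched_point buy_bids sell_bids) := by
  unfold Pre_get_matched_point; infer_instance

def pvWitness_get_matched_point : List (List Int) × List (List Int) :=
  ([[2, 5], [3, 4]], [[1, 1], [4, 2]])

def Spec_get_matched_point (buy_bids : List (List Int)) (sell_bids : List (List Int)) (out : Option (Int × Int)) : Prop := out = get_matched_point_alt buy_bids sell_bids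
instance (buy_bids : List (List Int)) (sell_bids : List (List Int)) (out : Option (Int × Int)) : Decidable (Spec_get_matched_point buy_bids sell_bids out) := by unfold Spec_get_matched_point; infer_instance

-- ===== CLAIM (what is proved, stated in full; the proofs are below) =====
def Claim_equal_get_matched_point : Prop := ∀ (buy_bids : List (List Int)) (sell_bids : List (List Int)), Dom_get_matched_point buy_bids sell_bids → Pre_get_matched_point buy_bids sell_bids → Spec_get_matched_point buy_bids sell_bids (get_matched_point buy_bids sell_bids)

-- ===== LEMMAS AND PROOFS =====

def fmOpt (pick : Bool) (v : Int) (prev : Int × List Int) : List (Int × List Int) → Option Int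
  | [] => none
  | cur :: rest =>
      if prev.1 < v ∧ v ≤ cur.1 then
        some (PySem.List.pyGetD (if pick then prev else cur).2 1 0)
      else fmOpt pick v cur rest

def gRow (p : Int × List Int) : List Int := PySem.List.pySetD p.2 0 p.1

theorem gRow_head (p : Int × List Int) (h : p.2 ≠ []) :
    PySem.List.pyGetD (gRow p) 0 0 = p.1 := by
  obtain ⟨t, l⟩ := p
  cases l with
  | nil => simp at h
  | cons a rest => simp [gRow, pysem, PySem.List.pySetD, PySem.List.pySet?, PySem.List.pyIdx?]

theorem gRow_price (p : Int × List Int) :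
    PySem.List.pyGetD (gRow p) 1 0 = PySem.List.pyGetD p.2 1 0 := by
  obtain ⟨t, l⟩ := p
  cases l with
  | nil => simp [gRow, PySem.List.pySetD, PySem.List.pySet?, PySem.List.pyIdx?]
  | cons a rest => simp [gRow, pysem, PySem.List.pySetD, PySem.List.pySet?, PySem.List.pyIdx?]

theorem acc_eq_map_cum (rs : List (List Int)) : ∀ prev, aAcc prev rs = (bCum prev rs).map gRow := by
  induction rs with
  | nil => intro prev; simp [aAcc, bCum]
  | cons r rest ih =>
      intro prev
      simp only [aAcc, bCum, List.map_cons, gRow]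
      rw [Int.add_comm prev (PySem.List.pyGetD r 0 0)] at *
      rw [ih]

theorem cum_rows_mem (rs : List (List Int)) : ∀ prev p, p ∈ bCum prev rs → p.2 ∈ rs := by
  induction rs with
  | nil => intro prev p h; simp [bCum] at h
  | cons r rest ih =>
      intro prev p h
      simp only [bCum, List.mem_cons] at h
      rcases h with h | h
      · subst h; simp
      · exact List.mem_cons_of_mem _ (ih _ _ h)

theorem aPBgo_eq_fm (c : List (Int × List Int)) : ∀ (p : Int × List Int) (v dflt : Int),
    p.2 ≠ [] → (∀ q ∈ c, q.2 ≠ []) →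
    aPBgo v dflt (gRow p) (c.map gRow) = (fmOpt false v p c).getD dflt := by
  induction c with
  | nil => intro p v dflt _ _; simp [aPBgo, fmOpt]
  | cons cur rest ih =>
      intro p v dflt hp hc
      have hcur : cur.2 ≠ [] := hc cur (by simp)
      simp only [List.map_cons, aPBgo, fmOpt, gRow_head p hp, gRow_head cur hcur, gRow_price]
      split
      · simp
      · exact ih cur v dflt hcur (fun q hq => hc q (by simp [hq]))

theorem aPSgo_eq_fm (c : List (Int × List Int)) : ∀ (p : Int × List Int) (v dflt : Int),
    p.2 ≠ [] → (∀ q ∈ c, q.2 ≠ []) →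
    aPSgo v dflt (gRow p) (c.map gRow) = (fmOpt true v p c).getD dflt := by
  induction c with
  | nil => intro p v dflt _ _; simp [aPSgo, fmOpt]
  | cons cur rest ih =>
      intro p v dflt hp hc
      have hcur : cur.2 ≠ [] := hc cur (by simp)
      simp only [List.map_cons, aPSgo, fmOpt, gRow_head p hp, gRow_head cur hcur, gRow_price]
      split
      · simp
      · exact ih cur v dflt hcur (fun q hq => hc q (by simp [hq]))

theorem pairwise_getElem_le (vols : List Int) (hs : vols.Pairwise (· ≤ ·))
    {i j : Nat} (hi : i < vols.length) (hj : j < vols.length) (hij : i ≤ j) :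
    vols[i] ≤ vols[j] := by
  rcases Nat.eq_or_lt_of_le hij with h | h
  · subst h; rfl
  · exact (List.pairwise_iff_getElem.mp hs) i j hi hj h

theorem bBisect_spec (vols : List Int) (x : Int) (hs : vols.Pairwise (· ≤ ·)) :
    ∀ n lo hi, hi - lo ≤ n → lo ≤ hi → hi ≤ vols.length →
      (∀ j (hj : j < vols.length), j < lo → vols[j] ≤ x) →
      (∀ j (hj : j < vols.length), hi ≤ j → x < vols[j]) →
      bBisect vols x lo hi ≤ vols.length ∧
      (∀ j (hj : j < vols.length), j < bBisect vols x lo hi → vols[j] ≤ x) ∧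
      (∀ j (hj : j < vols.length), bBisect vols x lo hi ≤ j → x < vols[j]) := by
  intro n
  induction n with
  | zero =>
      intro lo hi hfuel hlohi hlen hbelow habove
      have : lo = hi := by omega
      subst this
      rw [bBisect]
      simp only [lt_irrefl, if_false]
      exact ⟨by omega, fun j hj hjlo => hbelow j hj hjlo, fun j hj hjlo => habove j hj hjlo⟩
  | succ n ih =>
      intro lo hi hfuel hlohi hlen hbelow habove
      rw [bBisect]
      by_cases hlt : lo < hi
      · simp only [hlt, if_true]
        have hmid : (lo + hi) / 2 < vols.length := by omega
        have hget : PySem.List.pyGetD vols (((lo + hi) / 2 : Nat) : Int) 0 = vols[(lo + hi) / 2] := by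
          rw [PySem.List.pyGetD_natCast]
          exact List.getD_eq_getElem vols 0 hmid
        by_cases hx : vols[(lo + hi) / 2] ≤ x
        · rw [if_pos (by rw [hget]; exact hx)]
          exact ih ((lo + hi) / 2 + 1) hi (by omega) (by omega) hlen
            (fun j hj hjlo => le_trans (pairwise_getElem_le vols hs hj hmid (by omega)) hx)
            habove
        · rw [if_neg (by rw [hget]; exact hx)]
          exact ih lo ((lo + hi) / 2) (by omega) (by omega) (by omega) hbelow
            (fun j hj hjlo => lt_of_lt_of_le (lt_of_not_ge hx) (pairwise_getElem_le vols hs hmid hj hjlo))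
      · simp only [hlt, if_false]
        have : lo = hi := by omega
        subst this
        exact ⟨by omega, fun j hj hjlo => hbelow j hj hjlo, fun j hj hjlo => habove j hj hjlo⟩

theorem bBisectGt_spec (vols : List Int) (x : Int) (hs : vols.Pairwise (· ≤ ·)) :
    bBisectGt vols x ≤ vols.length ∧
    (∀ j (hj : j < vols.length), j < bBisectGt vols x → vols[j] ≤ x) ∧
    (∀ j (hj : j < vols.length), bBisectGt vols x ≤ j → x < vols[j]) := by
  exact bBisect_spec vols x hs vols.length 0 vols.length (by omega) (by omega) le_rfl
    (fun j hj h => by omega) (fun j hj h => by omega)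

theorem mem_seg_iff (vols : List Int) (hs : vols.Pairwise (· ≤ ·)) (lo hi v : Int) :
    v ∈ PySem.List.slice vols (some ((bBisectGt vols lo : Nat) : Int))
          (some ((bBisectGt vols hi : Nat) : Int)) ↔ v ∈ vols ∧ lo < v ∧ v ≤ hi := by
  obtain ⟨hjlen, hjle, hjgt⟩ := bBisectGt_spec vols lo hs
  obtain ⟨hklen, hkle, hkgt⟩ := bBisectGt_spec vols hi hs
  set j := bBisectGt vols lo with hj
  set k := bBisectGt vols hi with hk
  rw [PySem.List.slice_natCast]
  constructor
  · intro hmem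
    obtain ⟨idx, hidx, hval⟩ := List.mem_iff_getElem.mp hmem
    have hb : idx < k - j ∧ idx < vols.length - j := by
      simpa [List.length_take, List.length_drop] using hidx
    have hlen' : j + idx < vols.length := by omega
    have hval' : vols[j + idx]'hlen' = v := by
      rw [← hval, List.getElem_take, List.getElem_drop]
    refine ⟨by rw [← hval']; exact List.getElem_mem _, ?_, ?_⟩
    · rw [← hval']; exact hjgt (j + idx) hlen' (by omega)
    · rw [← hval']; exact hkle (j + idx) hlen' (by omega)
  · rintro ⟨hmem, hlo, hhi⟩
    obtain ⟨i, hilen, hval⟩ := List.mem_iff_getElem.mp hmem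
    have hij : j ≤ i := by
      by_contra hcon
      have := hjle i hilen (by omega)
      rw [hval] at this
      omega
    have hik : i < k := by
      by_contra hcon
      have := hkgt i hilen (by omega)
      rw [hval] at this
      omega
    apply List.mem_iff_getElem.mpr
    refine ⟨i - j, ?_, ?_⟩
    · simp [List.length_take, List.length_drop]; omega
    · have h1 : i - j < k - j := by omega
      have h2 : i - j < (vols.drop j).length := by simp [List.length_drop]; omega
      rw [List.getElem_take, List.getElem_drop]
      rw [← hval]
      congr 1
      omega


theorem foldl_insert_absent_get? (price : Int) (l : List Int) :
    ∀ (d : PySem.Dict Int Int) (v : Int),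
      (l.foldl (fun d v => if d.contains v then d else d.insert v price) d).get? v =
        if v ∈ l ∧ d.get? v = none then some price else d.get? v := by
  induction l with
  | nil => intro d v; simp
  | cons x l ih =>
      intro d v
      rw [List.foldl_cons, ih]
      by_cases hc : d.contains x
      · simp only [hc, if_true]
        have hx : d.get? x ≠ none := by
          rw [PySem.Dict.contains_eq_isSome_get?] at hc
          exact Option.isSome_iff_ne_none.mp hc
        by_cases hv : v = x
        · subst hv; simp [hx]
        · simp [List.mem_cons, hv]
      · simp only [hc]
        have hx : d.get? x = none := by
          rw [PySem.Dict.contains_eq_isSome_get?] at hc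
          simpa using hc
        by_cases hv : v = x
        · subst hv
          simp [hx]
        · simp [PySem.Dict.get?_insert, hv, List.mem_cons]

theorem bSeg_get? (vols : List Int) (pick : Bool) (hs : vols.Pairwise (· ≤ ·)) :
    ∀ (c : List (Int × List Int)) (prev : Int × List Int) (d : PySem.Dict Int Int) (v : Int),
      v ∈ vols →
      (bSeg vols pick d prev c).get? v = ((d.get? v).or (fmOpt pick v prev c)) := by
  intro c
  induction c with
  | nil => intro prev d v _; simp [bSeg, fmOpt]
  | cons cur rest ih =>
      intro prev d v hv
      by_cases hlh : prev.1 ≥ cur.1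
      · rw [show bSeg vols pick d prev (cur :: rest) = bSeg vols pick d cur rest by
          simp [bSeg, hlh]]
        rw [ih cur d v hv]
        have hno : ¬ (prev.1 < v ∧ v ≤ cur.1) := by omega
        simp [fmOpt, hno]
      · rw [show bSeg vols pick d prev (cur :: rest) =
            bSeg vols pick
              ((PySem.List.slice vols (some ((bBisectGt vols prev.1 : Nat) : Int))
                  (some ((bBisectGt vols cur.1 : Nat) : Int))).foldl
                (fun d v => if d.contains v then d else d.insert v
                  (PySem.List.pyGetD (if pick then prev else cur).2 1 0)) d)
              cur rest by
          simp [bSeg, hlh]]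
        rw [ih _ _ v hv, foldl_insert_absent_get?]
        by_cases hcond : prev.1 < v ∧ v ≤ cur.1
        · have hin : v ∈ PySem.List.slice vols (some ((bBisectGt vols prev.1 : Nat) : Int))
              (some ((bBisectGt vols cur.1 : Nat) : Int)) :=
            (mem_seg_iff vols hs prev.1 cur.1 v).mpr ⟨hv, hcond⟩
          cases hdv : d.get? v with
          | none => rw [if_pos ⟨hin, rfl⟩]; simp [fmOpt, hcond]
          | some p => rw [if_neg (by simp)]; simp
        · have hnin : v ∉ PySem.List.slice vols (some ((bBisectGt vols prev.1 : Nat) : Int))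
              (some ((bBisectGt vols cur.1 : Nat) : Int)) :=
            fun h => hcond ((mem_seg_iff vols hs prev.1 cur.1 v).mp h).2
          rw [if_neg (by tauto)]
          simp [fmOpt, hcond]

theorem heads_eq (rs : List (List Int)) (h : ∀ r ∈ rs, r ≠ []) :
    (aAcc 0 rs).map (fun r => PySem.List.pyGetD r 0 0) = (bCum 0 rs).map (·.1) := by
  rw [acc_eq_map_cum rs 0, List.map_map]
  apply List.map_congr_left
  intro p hp
  exact gRow_head p (h p.2 (cum_rows_mem rs 0 p hp))

theorem main_loops_eq (bb sb : List (List Int)) (bt st : PySem.Dict Int Int) (bd sd : Int)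
    (vols : List Int) :
    ∀ (vs : List Int) (mp mv : Int), (∀ v ∈ vs, v ∈ vols) →
      (∀ v ∈ vols, aPriceBuy bb v = bt.getD v bd) →
      (∀ v ∈ vols, aPriceSell sb v = st.getD v sd) →
      aMain bb sb vs mp mv = bMain bt st bd sd vs mp mv := by
  intro vs
  induction vs with
  | nil => intro mp mv _ _ _; simp [aMain, bMain]
  | cons v rest ih =>
      intro mp mv hsub hb hsv
      have hv : v ∈ vols := hsub v (by simp)
      simp only [aMain, bMain, hb v hv, hsv v hv]
      split
      · rfl
      · exact ih _ _ (fun u hu => hsub u (by simp [hu])) hb hsv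

-- the curve's rows are nonempty under Pre_'s nonempty-rows clause
theorem curve_rows_ne (bids : List (List Int)) (h : ∀ r ∈ bids, r ≠ []) :
    ∀ q ∈ bCum 0 bids, q.2 ≠ [] :=
  fun q hq => h q.2 (cum_rows_mem bids 0 q hq)

theorem gRow_origin : gRow (0, ([0, 0] : List Int)) = ([0, 0] : List Int) := by
  simp [gRow, PySem.List.pySetD, PySem.List.pySet?, PySem.List.pyIdx?]

-- A's prepended accumulated list is the curve mapped through gRow
theorem prepended_eq_map (bids : List (List Int)) :
    (([0, 0] : List Int) :: aAcc 0 bids) = (bCurve bids).map gRow := by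
  rw [acc_eq_map_cum bids 0, bCurve, List.map_cons, gRow_origin]

theorem default_eq (bids : List (List Int)) :
    PySem.List.pyGetD (PySem.List.pyGetD (([0, 0] : List Int) :: aAcc 0 bids) (-1) []) 1 0 =
      PySem.List.pyGetD (PySem.List.pyGetD (bCurve bids) (-1) (0, [])).2 1 0 := by
  have hne : (([0, 0] : List Int) :: aAcc 0 bids) ≠ [] := by simp
  have hne' : bCurve bids ≠ [] := by simp [bCurve]
  rw [PySem.List.pyGetD_neg_one _ _ hne, PySem.List.pyGetD_neg_one _ _ hne']
  have hlast : (([0, 0] : List Int) :: aAcc 0 bids).getLast hne =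
      gRow ((bCurve bids).getLast hne') := by
    have hm := congrArg List.getLast? (prepended_eq_map bids)
    rw [List.getLast?_map] at hm
    rw [List.getLast?_eq_some_getLast hne, List.getLast?_eq_some_getLast hne'] at hm
    simpa using hm
  rw [hlast]
  exact gRow_price _

theorem ports_eq (bb sb : List (List Int))
    (hb : ∀ r ∈ bb, r ≠ []) (hsb : ∀ r ∈ sb, r ≠ []) :
    get_matched_point bb sb = get_matched_point_alt bb sb := by
  simp only [get_matched_point, get_matched_point_alt, accumulate_bids]
  set vols := PySem.List.sorted
      (PySem.Set.union
        (PySem.Set.ofList (((PySem.List.slice (bCurve bb) (some 1) none)).map (·.1)))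
        (PySem.Set.ofList (((PySem.List.slice (bCurve sb) (some 1) none)).map (·.1))))
      (fun x => x) false with hvols
  have hbase : get_base_volumes (aAcc 0 bb) (aAcc 0 sb) = vols := by
    rw [hvols, get_base_volumes]
    rw [PySem.List.slice_from_one, PySem.List.slice_from_one]
    simp only [bCurve, List.tail_cons]
    rw [heads_eq bb hb, heads_eq sb hsb]
  have hsorted : vols.Pairwise (· ≤ ·) := by
    rw [hvols]; exact PySem.List.sorted_pairwise _ _
  rw [hbase]
  apply main_loops_eq
  · exact fun v hv => hv
  · -- buy side
    intro v hv
    rw [show (([0, 0] : List Int) :: aAcc 0 bb) = (bCurve bb).map gRow from prepended_eq_map bb]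
    have hrows : ∀ q ∈ bCum 0 bb, q.2 ≠ [] := curve_rows_ne bb hb
    simp only [aPriceBuy, bCurve, List.map_cons]
    rw [aPBgo_eq_fm (bCum 0 bb) (0, ([0,0] : List Int)) v _ (by simp) hrows]
    rw [PySem.Dict.getD_eq_get?_getD]
    rw [show bPriceTable ((0, ([0,0] : List Int)) :: bCum 0 bb) vols false =
        bSeg vols false PySem.Dict.empty (0, ([0,0] : List Int)) (bCum 0 bb) from rfl]
    rw [bSeg_get? vols false hsorted (bCum 0 bb) _ _ v hv]
    rw [PySem.Dict.get?_empty, Option.none_or]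
    have hd := default_eq bb
    rw [prepended_eq_map bb] at hd
    simp only [bCurve, List.map_cons] at hd
    rw [hd]
  · -- sell side
    intro v hv
    rw [show (([0, 0] : List Int) :: aAcc 0 sb) = (bCurve sb).map gRow from prepended_eq_map sb]
    have hrows : ∀ q ∈ bCum 0 sb, q.2 ≠ [] := curve_rows_ne sb hsb
    simp only [aPriceSell, bCurve, List.map_cons]
    rw [aPSgo_eq_fm (bCum 0 sb) (0, ([0,0] : List Int)) v _ (by simp) hrows]
    rw [PySem.Dict.getD_eq_get?_getD]
    rw [show bPriceTable ((0, ([0,0] : List Int)) :: bCum 0 sb) vols true =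
        bSeg vols true PySem.Dict.empty (0, ([0,0] : List Int)) (bCum 0 sb) from rfl]
    rw [bSeg_get? vols true hsorted (bCum 0 sb) _ _ v hv]
    rw [PySem.Dict.get?_empty, Option.none_or]
    have hd := default_eq sb
    rw [prepended_eq_map sb] at hd
    simp only [bCurve, List.map_cons] at hd
    rw [hd]

-- ===== VERDICT (by name: the statement is the Claim_ definition above) =====
theorem get_matched_point_spec : Claim_equal_get_matched_point := by
  intro bb sb _hdom hpre
  show get_matched_point bb sb = get_matched_point_alt bb sb
  exact ports_eq bb sb hpre.1 hpre.2.1
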